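-- pv_equiv track=rewrite | github.com/ylivshits/wide_nets_labs | lab1/server.py | split_bytes
-- ===== SOURCE A (Python) =====
-- def split_bytes(a):
-- 	res = [[]]
-- 	for byte in a:
-- 		for bit in range(8):
-- 			if len(res[-1]) == 69:
-- 				res.append([])
-- 			res[-1].append((byte >> bit) & 1)
-- 	if len(res[-1]) == 0:
-- 		res.pop()
-- 	while len(res[-1]) < 69:
-- 		res[-1].append(0)
-- 	return res
-- ===== SOURCE B (Python) =====
-- def split_bytes(a):
--     bits = [(byte >> bit) & 1 for byte in a for bit in range(8)]
--     res = []
--     i = 0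
--     while i < len(bits):
--         res.append(bits[i:i+69])
--         i += 69
--     res[-1] = res[-1] + [0] * (69 - len(res[-1]))
--     return res
-- ===== Notes on version B (the rewrite author's own statement) =====
-- stated objective: alternative
-- what changed: A grows the last chunk in place inside one stateful nested loop (a length test and append per bit) and pads one zero at a time; B builds the whole flat bit list with a comprehension, slices it into 69-bit chunks with an index-stepping while loop, and pads the last chunk in one step with [0]*(69-len).
import Mathlib
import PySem

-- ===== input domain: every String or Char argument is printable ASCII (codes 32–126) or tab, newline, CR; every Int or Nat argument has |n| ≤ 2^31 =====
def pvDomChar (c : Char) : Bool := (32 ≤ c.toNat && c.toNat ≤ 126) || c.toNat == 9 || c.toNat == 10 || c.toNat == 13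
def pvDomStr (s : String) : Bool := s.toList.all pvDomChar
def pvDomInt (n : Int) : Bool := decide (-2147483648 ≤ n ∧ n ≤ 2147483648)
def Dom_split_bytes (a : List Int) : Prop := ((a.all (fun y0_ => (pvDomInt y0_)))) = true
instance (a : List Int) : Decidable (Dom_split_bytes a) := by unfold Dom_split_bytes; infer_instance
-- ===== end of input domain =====

-- B builds the flat bit list first, then slices it into 69-bit chunks and pads the last chunk
-- in one step with replicated zeros, instead of A's single stateful nested loop that grows the
-- last chunk in place and pads zero by zero; objective: alternative decomposition, same cost.

-- ===== PORT A =====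
-- len(res[-1])  (res is never empty where A runs it)
def pvLastLen (res : List (List Int)) : Nat := (res.getLastD []).length

-- res[-1].append(x)  (on [] Python would raise; A never reaches that)
def pvPushLast (res : List (List Int)) (x : Int) : List (List Int) :=
  match res with
  | [] => [[x]]
  | [c] => [c ++ [x]]
  | c :: rest => c :: pvPushLast rest x

theorem pvLastLen_pushLast (res : List (List Int)) (x : Int) :
    pvLastLen (pvPushLast res x) = pvLastLen res + 1 := by
  induction res with
  | nil => rfl
  | cons c rest ih =>
    cases rest with
    | nil => simp [pvPushLast, pvLastLen]
    | cons d tl =>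
      show pvLastLen (c :: pvPushLast (d :: tl) x) = pvLastLen (c :: d :: tl) + 1
      cases hp : pvPushLast (d :: tl) x with
      | nil => cases tl <;> simp [pvPushLast] at hp
      | cons e es =>
        rw [← hp]
        have h1 : pvLastLen (c :: pvPushLast (d :: tl) x) = pvLastLen (pvPushLast (d :: tl) x) := by
          rw [hp]; exact (by cases es <;> simp [pvLastLen])
        rw [h1, ih]
        cases tl <;> simp [pvLastLen]

-- the body of A's inner loop: if len(res[-1]) == 69: res.append([]); res[-1].append(x)
def pvStep (res : List (List Int)) (x : Int) : List (List Int) :=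
  pvPushLast (if pvLastLen res = 69 then res ++ [[]] else res) x

-- while len(res[-1]) < 69: res[-1].append(0)
def pvPadLast (res : List (List Int)) : List (List Int) :=
  if pvLastLen res < 69 then pvPadLast (pvPushLast res 0) else res
termination_by 69 - pvLastLen res
decreasing_by simp [pvLastLen_pushLast]; omega

def split_bytes (a : List Int) : List (List Int) :=
  let res := a.foldl (fun res byte =>
    (PySem.List.pyRange 0 8 1).foldl (fun res bit =>
      pvStep res (PySem.Int.band (byte >>> bit.toNat) 1)) res) [[]]
  let res := if pvLastLen res = 0 then res.dropLast else res
  pvPadLast res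

-- ===== PORT B =====
-- while i < len(bits): res.append(bits[i:i+69]); i += 69
-- (i stays a nonnegative int, so the slice bits[i:i+69] is exactly (bits.drop i).take 69)
def pvChunkLoop (bits : List Int) (i : Nat) (res : List (List Int)) : List (List Int) :=
  if i < bits.length then pvChunkLoop bits (i + 69) (res ++ [(bits.drop i).take 69])
  else res
termination_by bits.length - i

def split_bytes_alt (a : List Int) : List (List Int) :=
  let bits := a.flatMap (fun byte =>
    (PySem.List.pyRange 0 8 1).map (fun bit => PySem.Int.band (byte >>> bit.toNat) 1))
  let res := pvChunkLoop bits 0 []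
  -- res[-1] = res[-1] + [0] * (69 - len(res[-1]))  (res ≠ [] whenever Python reaches this line)
  res.dropLast ++ [res.getLastD [] ++ List.replicate (69 - (res.getLastD []).length) 0]

-- ===== PRECONDITION & SPEC =====
-- Python A raises IndexError on the empty list (res[-1] after the pop); B raises there too.
def Pre_split_bytes (a : List Int) : Prop := a ≠ []
instance (a : List Int) : Decidable (Pre_split_bytes a) := by unfold Pre_split_bytes; infer_instance
def pvWitness_split_bytes : List Int := [5, -3]

def Spec_split_bytes (a : List Int) (out : List (List Int)) : Prop := out = split_bytes_alt a
instance (a : List Int) (out : List (List Int)) : Decidable (Spec_split_bytes a out) := by unfold Spec_split_bytes; infer_instance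

-- ===== CLAIM (what is proved, stated in full; the proofs are below) =====
def Claim_equal_split_bytes : Prop := ∀ (a : List Int), Dom_split_bytes a → Pre_split_bytes a → Spec_split_bytes a (split_bytes a)

-- ===== LEMMAS AND PROOFS =====

-- canonical chunking into blocks of 69
def chunks69 : List Int → List (List Int)
  | [] => []
  | x :: xs => ((x :: xs).take 69) :: chunks69 ((x :: xs).drop 69)
termination_by l => l.length
decreasing_by simp

theorem chunks69_nil : chunks69 [] = [] := by simp [chunks69]

theorem chunks69_cons (x : Int) (xs : List Int) :
    chunks69 (x :: xs) = ((x :: xs).take 69) :: chunks69 ((x :: xs).drop 69) := by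
  simp [chunks69]

-- A's loop, restated on the last chunk only
def chunkFrom (cur : List Int) : List Int → List (List Int)
  | [] => [cur]
  | b :: rest => if cur.length = 69 then cur :: chunkFrom [b] rest else chunkFrom (cur ++ [b]) rest

theorem pvLastLen_cons (c : List Int) (l : List (List Int)) (h : l ≠ []) :
    pvLastLen (c :: l) = pvLastLen l := by
  cases l with
  | nil => exact absurd rfl h
  | cons d tl => simp [pvLastLen]

theorem pvLastLen_append (done : List (List Int)) (cur : List Int) :
    pvLastLen (done ++ [cur]) = cur.length := by
  simp [pvLastLen]

theorem pvPushLast_append (done : List (List Int)) (cur : List Int) (x : Int) :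
    pvPushLast (done ++ [cur]) x = done ++ [cur ++ [x]] := by
  induction done with
  | nil => rfl
  | cons c rest ih =>
    cases rest with
    | nil => simp [pvPushLast]
    | cons d tl => simpa [pvPushLast] using ih

theorem foldl_step_eq (bits : List Int) : ∀ (done : List (List Int)) (cur : List Int),
    bits.foldl pvStep (done ++ [cur]) = done ++ chunkFrom cur bits := by
  induction bits with
  | nil => intro done cur; simp [chunkFrom]
  | cons b rest ih =>
    intro done cur
    by_cases h : cur.length = 69
    · have hs : pvStep (done ++ [cur]) b = (done ++ [cur]) ++ [[b]] := by
        rw [pvStep, if_pos (by rw [pvLastLen_append]; exact h)]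
        rw [show done ++ [cur] ++ [[]] = (done ++ [cur]) ++ [([] : List Int)] from by simp]
        rw [pvPushLast_append]; simp
      simp only [List.foldl_cons, hs, ih, chunkFrom, h, ite_true]
      simp
    · have hs : pvStep (done ++ [cur]) b = done ++ [cur ++ [b]] := by
        rw [pvStep, if_neg (by rw [pvLastLen_append]; exact h)]
        rw [pvPushLast_append]
      simp only [List.foldl_cons, hs, ih, chunkFrom, h, ite_false]

theorem chunkFrom_eq (bits : List Int) : ∀ (cur : List Int), cur.length ≤ 69 →
    chunkFrom cur bits =
      (cur ++ bits.take (69 - cur.length)) :: chunks69 (bits.drop (69 - cur.length)) := by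
  induction bits with
  | nil => intro cur _; simp [chunkFrom, chunks69_nil]
  | cons b rest ih =>
    intro cur hle
    by_cases h : cur.length = 69
    · simp only [chunkFrom, h, ite_true]
      rw [ih [b] (by simp)]
      simp only [List.length_cons, List.length_nil, Nat.sub_self, List.take_zero,
        List.drop_zero, List.append_nil]
      rw [chunks69_cons b rest, show (69 : Nat) = 68 + 1 from rfl, List.take_succ_cons,
        List.drop_succ_cons]
      simp
    · simp only [chunkFrom, h, ite_false]
      rw [ih (cur ++ [b]) (by simp; omega)]
      have hk : 69 - cur.length = (69 - (cur.length + 1)) + 1 := by omega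
      rw [hk]
      simp

theorem chunks69_mem_ne_nil : ∀ (n : Nat) (l : List Int), l.length ≤ n →
    ∀ c ∈ chunks69 l, c ≠ [] := by
  intro n
  induction n with
  | zero =>
    intro l hl
    have : l = [] := List.length_eq_zero_iff.mp (by omega)
    subst this; simp [chunks69_nil]
  | succ n ih =>
    intro l hl c hc
    cases l with
    | nil => simp [chunks69_nil] at hc
    | cons x xs =>
      rw [chunks69_cons] at hc
      rw [List.mem_cons] at hc
      rcases hc with hceq | hcm
      · subst hceq; simp
      · exact ih ((x :: xs).drop 69)
          (by simp only [List.length_drop, List.length_cons] at hl ⊢; omega) c hcm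

theorem pvLastLen_ne_zero : ∀ (l : List (List Int)), l ≠ [] → (∀ c ∈ l, c ≠ []) →
    pvLastLen l ≠ 0
  | [], hne, _ => absurd rfl hne
  | [c], _, h => by simpa [pvLastLen] using h c (by simp)
  | c :: d :: tl, _, h => by
      rw [pvLastLen_cons c (d :: tl) (by simp)]
      exact pvLastLen_ne_zero (d :: tl) (by simp) (fun e he => h e (by simp [he]))

def pvBits (a : List Int) : List Int :=
  a.flatMap (fun byte => (PySem.List.pyRange 0 8 1).map (fun bit => PySem.Int.band (byte >>> bit.toNat) 1))

theorem pvBits_ne_nil (a : List Int) (ha : a ≠ []) : pvBits a ≠ [] := by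
  cases a with
  | nil => exact absurd rfl ha
  | cons y ys => simp [pvBits, PySem.List.pyRange]

theorem split_bytes_eq_pad (a : List Int) (ha : a ≠ []) :
    split_bytes a = pvPadLast (chunks69 (pvBits a)) := by
  unfold split_bytes
  dsimp only
  have hloop : a.foldl (fun res byte =>
      (PySem.List.pyRange 0 8 1).foldl (fun res bit =>
        pvStep res (PySem.Int.band (byte >>> bit.toNat) 1)) res) [[]]
      = (pvBits a).foldl pvStep [[]] := by
    rw [pvBits, List.foldl_flatMap]
    congr 1
  have hbne := pvBits_ne_nil a ha
  have hres : (pvBits a).foldl pvStep [[]] = chunks69 (pvBits a) := by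
    have h0 := foldl_step_eq (pvBits a) [] []
    rw [List.nil_append] at h0
    rw [h0, chunkFrom_eq (pvBits a) [] (by simp)]
    cases hb : pvBits a with
    | nil => exact absurd hb hbne
    | cons x xs => rw [chunks69_cons]; simp
  simp only [hloop, hres]
  have hlast : pvLastLen (chunks69 (pvBits a)) ≠ 0 := by
    apply pvLastLen_ne_zero
    · cases hb : pvBits a with
      | nil => exact absurd hb hbne
      | cons x xs => rw [chunks69_cons]; simp
    · exact chunks69_mem_ne_nil (pvBits a).length _ le_rfl
  rw [if_neg hlast]

-- B-side lemmas

theorem dropLast_concat_getLastD : ∀ (res : List (List Int)), res ≠ [] →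
    res.dropLast ++ [res.getLastD []] = res
  | [], h => absurd rfl h
  | [c], _ => rfl
  | c :: d :: tl, _ => by
      have := dropLast_concat_getLastD (d :: tl) (by simp)
      simpa using this

theorem pvPadLast_eq_replicate : ∀ (n : Nat) (res : List (List Int)), res ≠ [] →
    69 - pvLastLen res ≤ n →
    pvPadLast res = res.dropLast ++ [res.getLastD [] ++ List.replicate (69 - pvLastLen res) 0] := by
  intro n
  induction n with
  | zero =>
    intro res hne hb
    have h69 : ¬ pvLastLen res < 69 := by omega
    rw [pvPadLast, if_neg h69, show 69 - pvLastLen res = 0 from by omega]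
    simp only [List.replicate_zero, List.append_nil]
    exact (dropLast_concat_getLastD res hne).symm
  | succ n ih =>
    intro res hne hb
    by_cases h : pvLastLen res < 69
    · rw [pvPadLast, if_pos h]
      have hdec := dropLast_concat_getLastD res hne
      have hpush : pvPushLast res 0 = res.dropLast ++ [res.getLastD [] ++ [0]] := by
        conv_lhs => rw [← hdec]
        exact pvPushLast_append _ _ _
      have hlen : pvLastLen (pvPushLast res 0) = pvLastLen res + 1 := pvLastLen_pushLast res 0
      rw [ih (pvPushLast res 0) (by rw [hpush]; simp) (by omega)]
      rw [hlen, hpush]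
      simp only [List.dropLast_concat, List.getLastD_concat]
      rw [show 69 - pvLastLen res = (69 - (pvLastLen res + 1)) + 1 from by omega]
      simp [List.replicate_succ]
    · rw [pvPadLast, if_neg h, show 69 - pvLastLen res = 0 from by omega]
      simp only [List.replicate_zero, List.append_nil]
      exact (dropLast_concat_getLastD res hne).symm

theorem chunkLoop_eq : ∀ (n : Nat) (bits : List Int) (i : Nat), bits.length - i ≤ n →
    ∀ res, pvChunkLoop bits i res = res ++ chunks69 (bits.drop i) := by
  intro n
  induction n with
  | zero =>
    intro bits i hb res
    have hge : ¬ i < bits.length := by omega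
    rw [pvChunkLoop, if_neg hge, List.drop_eq_nil_of_le (by omega), chunks69_nil]
    simp
  | succ n ih =>
    intro bits i hb res
    by_cases h : i < bits.length
    · rw [pvChunkLoop, if_pos h, ih bits (i + 69) (by omega)]
      have hdd : bits.drop (i + 69) = (bits.drop i).drop 69 := by
        rw [List.drop_drop]
      cases hd : bits.drop i with
      | nil => exact absurd (by simpa using hd) (by omega : ¬ bits.length ≤ i)
      | cons x xs =>
        rw [hdd, hd, chunks69_cons]
        simp
    · rw [pvChunkLoop, if_neg h, List.drop_eq_nil_of_le (by omega), chunks69_nil]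
      simp

theorem split_bytes_alt_eq_pad (a : List Int) (ha : a ≠ []) :
    split_bytes_alt a = pvPadLast (chunks69 (pvBits a)) := by
  unfold split_bytes_alt
  dsimp only
  rw [show a.flatMap (fun byte => (PySem.List.pyRange 0 8 1).map
        (fun bit => PySem.Int.band (byte >>> bit.toNat) 1)) = pvBits a from rfl]
  rw [chunkLoop_eq (pvBits a).length (pvBits a) 0 (by omega) [], List.drop_zero]
  rw [List.nil_append]
  have hne : chunks69 (pvBits a) ≠ [] := by
    cases hb : pvBits a with
    | nil => exact absurd hb (pvBits_ne_nil a ha)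
    | cons x xs => rw [chunks69_cons]; simp
  rw [pvPadLast_eq_replicate (69 - pvLastLen (chunks69 (pvBits a))) _ hne le_rfl]
  rfl

-- ===== VERDICT (by name: the statement is the Claim_ definition above) =====
theorem split_bytes_spec : Claim_equal_split_bytes := by
  intro a _ hpre
  unfold Spec_split_bytes
  rw [split_bytes_eq_pad a hpre, split_bytes_alt_eq_pad a hpre]
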